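-- pv_equiv track=rewrite | github.com/FeDaniil/misis-sa | task2/task.py | get_relationships
-- ===== SOURCE A (Python) =====
-- def dfs(v, graph, used, rel3, rel5):
--     used.add(v)
--     neigh = []
--     h = 0
--     for u in graph[v]:
--         if u not in used:
--             neigh.append(u)
--             h = max(h, 1 + dfs(u, graph, used, rel3, rel5))
--     if h >= 2:
--         rel3.append(v)
--     if len(neigh) > 1:
--         for u in neigh:
--             rel5.append(u)
--     return h
--
-- def get_relationships(graph, n):
--     ans = []
--     rel3, rel5 = [], []
--     dfs(1, graph, set(), rel3, rel5)
--     ans.append([i for i in range(1, n + 1) if len(graph[i]) != 1 or i == 1]) # type 1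
--     ans.append([i for i in range(2, n + 1)]) # type 2
--     ans.append(rel3) # type 3
--     neigh_1 = set(graph[1])
--     ans.append([i for i in range(1, n + 1) if i != 1 and i not in neigh_1]) # type 4
--     ans.append(rel5)
--     for lst in ans:
--         lst.sort()
--     return ans
-- ===== SOURCE B (Python) =====
-- def get_relationships(graph, n):
--     def build(v, used):
--         used.add(v)
--         cs = []
--         for u in graph[v]:
--             if u not in used:
--                 cs.append(build(u, used))
--         return (v, cs)
--
--     def walk(t):
--         v, cs = t
--         rs = [walk(c) for c in cs]
--         h = 1 + max(r[0] for r in rs) if rs else 0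
--         r3 = [x for r in rs for x in r[1]]
--         r5 = [x for r in rs for x in r[2]]
--         if h >= 2:
--             r3 = r3 + [v]
--         if len(cs) > 1:
--             r5 = r5 + [c[0] for c in cs]
--         return (h, r3, r5)
--
--     _, rel3, rel5 = walk(build(1, set()))
--     type1 = [i for i in range(1, n + 1) if len(graph[i]) != 1 or i == 1]
--     type2 = [i for i in range(2, n + 1)]
--     neigh_1 = set(graph[1])
--     type4 = [i for i in range(1, n + 1) if i != 1 and i not in neigh_1]
--     return [sorted(l) for l in (type1, type2, rel3, type4, rel5)]
-- ===== Notes on version B (the rewrite author's own statement) =====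
-- stated objective: alternative
-- what changed: A's single recursive DFS that interleaves visiting with mutable rel3/rel5 accumulators and a running height max is replaced by a two-phase decomposition: first materialise the DFS tree, then a pure post-order walk over that tree computes heights and the two relation lists.
import Mathlib
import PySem

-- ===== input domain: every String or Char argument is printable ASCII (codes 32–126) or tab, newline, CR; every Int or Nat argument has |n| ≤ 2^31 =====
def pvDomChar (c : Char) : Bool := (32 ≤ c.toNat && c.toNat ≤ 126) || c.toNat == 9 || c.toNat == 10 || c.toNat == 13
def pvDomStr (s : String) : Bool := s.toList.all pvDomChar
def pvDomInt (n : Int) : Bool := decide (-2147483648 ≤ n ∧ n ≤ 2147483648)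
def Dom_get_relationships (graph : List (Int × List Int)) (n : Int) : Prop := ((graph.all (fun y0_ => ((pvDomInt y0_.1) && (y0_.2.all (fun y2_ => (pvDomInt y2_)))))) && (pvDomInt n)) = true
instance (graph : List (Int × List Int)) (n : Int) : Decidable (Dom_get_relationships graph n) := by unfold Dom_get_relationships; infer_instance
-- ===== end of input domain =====

-- B replaces A's fused recursive DFS (one recursion carrying rel3/rel5 accumulators and a running max)
-- by a different decomposition: first materialise the DFS tree, then a pure post-order walk over that
-- tree computes heights and the two relation lists (objective: alternative decomposition, same cost).

-- ===== PORT A =====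
-- dfs(v, graph, used, rel3, rel5): the mutable state (used, rel3, rel5) is threaded through;
-- fuel only makes the recursion total: it exceeds the maximal recursion depth (each nested call
-- adds a fresh node to `used`), so the 0-fuel branch is never reached.
-- graph[v] is ported as `getD v []`: a missing key is a Python KeyError, excluded by Pre_.
mutual
def dfsA (graph : List (Int × List Int)) : Nat → Int → PySem.Set Int → List Int → List Int → (Int × PySem.Set Int × List Int × List Int)
  | 0, _, used, rel3, rel5 => (0, used, rel3, rel5)
  | f+1, v, used, rel3, rel5 =>
    let used1 := PySem.Set.add used v
    let r := loopA graph f ((PySem.Dict.mk graph).getD v []) [] 0 used1 rel3 rel5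
    let rel3' := if r.2.1 ≥ 2 then r.2.2.2.1 ++ [v] else r.2.2.2.1
    let rel5' := if r.1.length > 1 then r.2.2.2.2 ++ r.1 else r.2.2.2.2
    (r.2.1, r.2.2.1, rel3', rel5')
  termination_by f _ _ _ _ => (f, 0)

-- the 'for u in graph[v]' loop: state (neigh, h, used, rel3, rel5)
def loopA (graph : List (Int × List Int)) : Nat → List Int → List Int → Int → PySem.Set Int → List Int → List Int → (List Int × Int × PySem.Set Int × List Int × List Int)
  | _, [], neigh, h, used, rel3, rel5 => (neigh, h, used, rel3, rel5)
  | f, u :: rest, neigh, h, used, rel3, rel5 =>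
    if PySem.Set.contains used u then
      loopA graph f rest neigh h used rel3 rel5
    else
      let r := dfsA graph f u used rel3 rel5
      loopA graph f rest (neigh ++ [u]) (max h (1 + r.1)) r.2.1 r.2.2.1 r.2.2.2
  termination_by f l _ _ _ _ _ => (f, l.length + 1)
end

def get_relationships (graph : List (Int × List Int)) (n : Int) : List (List Int) :=
  let fuel := graph.foldl (fun a p => a + p.2.length) 0 + 2
  let r := dfsA graph fuel 1 PySem.Set.empty [] []
  let t1 := (PySem.List.pyRange 1 (n+1) 1).filter (fun i => decide (((PySem.Dict.mk graph).getD i []).length ≠ 1) || (i == 1))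
  let t2 := PySem.List.pyRange 2 (n+1) 1
  let neigh1 := PySem.Set.ofList ((PySem.Dict.mk graph).getD 1 [])
  let t4 := (PySem.List.pyRange 1 (n+1) 1).filter (fun i => (i != 1) && !(PySem.Set.contains neigh1 i))
  [t1, t2, r.2.2.1, t4, r.2.2.2].map (fun l => PySem.List.sorted l (fun x => x) false)

-- ===== PORT B =====
-- the DFS tree: a node and its list of children (mutual pair instead of a nested inductive)
mutual
inductive TreeB : Type where
  | node : Int → ForestB → TreeB
inductive ForestB : Type where
  | nil : ForestB
  | cons : TreeB → ForestB → ForestB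
end

def forestLen : ForestB → Nat
  | .nil => 0
  | .cons _ ts => forestLen ts + 1

def rootOf : TreeB → Int
  | .node v _ => v

-- [c[0] for c in cs]
def forestRoots : ForestB → List Int
  | .nil => []
  | .cons t ts => rootOf t :: forestRoots ts

-- build(v, used): materialise the DFS tree; same fuel remark as for dfsA
mutual
def buildB (graph : List (Int × List Int)) : Nat → Int → PySem.Set Int → (TreeB × PySem.Set Int)
  | 0, v, used => (.node v .nil, used)
  | f+1, v, used =>
    let used1 := PySem.Set.add used v
    let r := buildLoopB graph f ((PySem.Dict.mk graph).getD v []) used1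
    (.node v r.1, r.2)
  termination_by f _ _ => (f, 0)

def buildLoopB (graph : List (Int × List Int)) : Nat → List Int → PySem.Set Int → (ForestB × PySem.Set Int)
  | _, [], used => (.nil, used)
  | f, u :: rest, used =>
    if PySem.Set.contains used u then
      buildLoopB graph f rest used
    else
      let c := buildB graph f u used
      let r := buildLoopB graph f rest c.2
      (.cons c.1 r.1, r.2)
  termination_by f l _ => (f, l.length + 1)
end

-- walk(t): pure post-order pass returning (height, rel3-part, rel5-part)
mutual
def walkB : TreeB → (Int × List Int × List Int)
  | .node v cs =>
    let rs := walkForestB cs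
    let h : Int := match rs with
      | [] => 0
      | r :: rest => 1 + rest.foldl (fun a x => max a x.1) r.1   -- 1 + max(r[0] for r in rs)
    let r3 := rs.flatMap (fun r => r.2.1)
    let r5 := rs.flatMap (fun r => r.2.2)
    let r3' := if h ≥ 2 then r3 ++ [v] else r3
    let r5' := if forestLen cs > 1 then r5 ++ forestRoots cs else r5
    (h, r3', r5')

def walkForestB : ForestB → List (Int × List Int × List Int)
  | .nil => []
  | .cons t ts => walkB t :: walkForestB ts
end

def get_relationships_alt (graph : List (Int × List Int)) (n : Int) : List (List Int) :=
  let fuel := graph.foldl (fun a p => a + p.2.length) 0 + 2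
  let w := walkB (buildB graph fuel 1 PySem.Set.empty).1
  let t1 := (PySem.List.pyRange 1 (n+1) 1).filter (fun i => decide (((PySem.Dict.mk graph).getD i []).length ≠ 1) || (i == 1))
  let t2 := PySem.List.pyRange 2 (n+1) 1
  let neigh1 := PySem.Set.ofList ((PySem.Dict.mk graph).getD 1 [])
  let t4 := (PySem.List.pyRange 1 (n+1) 1).filter (fun i => (i != 1) && !(PySem.Set.contains neigh1 i))
  [t1, t2, w.2.1, t4, w.2.2].map (fun l => PySem.List.sorted l (fun x => x) false)

-- ===== PRECONDITION & SPEC =====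
-- the set of nodes the DFS reaches from node 1: iterate neighbour expansion (a non-key member
-- contributes nothing) graph.length + 1 times, which is past the fixpoint
def pvReach (graph : List (Int × List Int)) : PySem.Set Int :=
  (List.range (graph.length + 1)).foldl
    (fun s _ => PySem.Set.update s (s.flatMap (fun v => (PySem.Dict.mk graph).getD v [])))
    (PySem.Set.ofList [1])

-- Pre_ excludes exactly the inputs where Python A raises KeyError: every i in 1..n and every
-- node reachable from node 1 (node 1 itself included) must be a key of graph. '1..n all keys'
-- is stated by counting the distinct keys lying in [1, n], so it decides fast for a huge n.
def Pre_get_relationships (graph : List (Int × List Int)) (n : Int) : Prop :=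
  ((decide ((((PySem.List.dedup (graph.map Prod.fst)).countP (fun k => decide (1 ≤ k ∧ k ≤ n))) : Int) = max n 0))
    && (pvReach graph).all (fun u => (PySem.Dict.mk graph).contains u)) = true
instance (graph : List (Int × List Int)) (n : Int) : Decidable (Pre_get_relationships graph n) := by unfold Pre_get_relationships; infer_instance

def pvWitness_get_relationships : (List (Int × List Int)) × Int := ([(1, [2, 3]), (2, [3]), (3, [])], 3)

def Spec_get_relationships (graph : List (Int × List Int)) (n : Int) (out : List (List Int)) : Prop := out = get_relationships_alt graph n
instance (graph : List (Int × List Int)) (n : Int) (out : List (List Int)) : Decidable (Spec_get_relationships graph n out) := by unfold Spec_get_relationships; infer_instance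

-- ===== CLAIM (what is proved, stated in full; the proofs are below) =====
def Claim_equal_get_relationships : Prop := ∀ (graph : List (Int × List Int)) (n : Int), Dom_get_relationships graph n → Pre_get_relationships graph n → Spec_get_relationships graph n (get_relationships graph n)

-- ===== LEMMAS AND PROOFS =====

-- heights produced by the walk are nonnegative
mutual
theorem walkB_h_nonneg (t : TreeB) : 0 ≤ (walkB t).1 := by
  cases t with
  | node v cs =>
    simp only [walkB]
    cases hrs : walkForestB cs with
    | nil => simp
    | cons r rest =>
      have h1 : 0 ≤ r.1 := walkForestB_h_nonneg cs r (by rw [hrs]; exact List.mem_cons_self)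
      have h2 := (PySem.List.le_foldl_max_int rest (fun x => x.1) r.1).1
      simp only
      omega

theorem walkForestB_h_nonneg (ts : ForestB) : ∀ r ∈ walkForestB ts, 0 ≤ r.1 := by
  cases ts with
  | nil => intro r hr; simp [walkForestB] at hr
  | cons t ts' =>
    intro r hr
    simp only [walkForestB, List.mem_cons] at hr
    rcases hr with h | h
    · subst h; exact walkB_h_nonneg t
    · exact walkForestB_h_nonneg ts' r h
end

theorem foldl_max_shift (l : List (Int × List Int × List Int)) (a : Int) :
    l.foldl (fun acc x => max acc (1 + x.1)) (1 + a) = 1 + l.foldl (fun acc x => max acc x.1) a := by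
  induction l generalizing a with
  | nil => rfl
  | cons x rest ih =>
    simp only [List.foldl_cons]
    rw [max_add_add_left]
    exact ih (max a x.1)

theorem length_forestRoots (ts : ForestB) : (forestRoots ts).length = forestLen ts := by
  cases ts with
  | nil => rfl
  | cons t ts' => simp [forestRoots, forestLen, length_forestRoots ts']

theorem buildB_root (graph : List (Int × List Int)) (f : Nat) (v : Int) (used : PySem.Set Int) :
    rootOf (buildB graph f v used).1 = v := by
  cases f <;> simp [buildB, rootOf]

theorem loopA_eq (graph : List (Int × List Int)) (f : Nat)
    (hdfs : ∀ v used r3 r5, dfsA graph f v used r3 r5 =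
      ((walkB (buildB graph f v used).1).1, (buildB graph f v used).2,
       r3 ++ (walkB (buildB graph f v used).1).2.1, r5 ++ (walkB (buildB graph f v used).1).2.2)) :
    ∀ (adj neigh : List Int) (h : Int) (used : PySem.Set Int) (r3 r5 : List Int),
      loopA graph f adj neigh h used r3 r5 =
      (neigh ++ forestRoots (buildLoopB graph f adj used).1,
       (walkForestB (buildLoopB graph f adj used).1).foldl (fun a x => max a (1 + x.1)) h,
       (buildLoopB graph f adj used).2,
       r3 ++ (walkForestB (buildLoopB graph f adj used).1).flatMap (fun r => r.2.1),
       r5 ++ (walkForestB (buildLoopB graph f adj used).1).flatMap (fun r => r.2.2)) := by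
  intro adj
  induction adj with
  | nil => intro neigh h used r3 r5; simp [loopA, buildLoopB, walkForestB, forestRoots]
  | cons u rest ih =>
    intro neigh h used r3 r5
    by_cases hc : PySem.Set.contains used u = true
    · simp only [loopA, buildLoopB, hc, if_true]
      exact ih neigh h used r3 r5
    · simp only [loopA, buildLoopB, hc, if_false, Bool.false_eq_true]
      rw [hdfs]
      rw [ih]
      simp only [walkForestB, forestRoots, List.foldl_cons, List.flatMap_cons, buildB_root]
      simp [List.append_assoc]

theorem dfsA_eq_walk_buildB (graph : List (Int × List Int)) : ∀ f : Nat,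
    (∀ v used r3 r5, dfsA graph f v used r3 r5 =
      ((walkB (buildB graph f v used).1).1, (buildB graph f v used).2,
       r3 ++ (walkB (buildB graph f v used).1).2.1, r5 ++ (walkB (buildB graph f v used).1).2.2)) := by
  intro f
  induction f with
  | zero => intro v used r3 r5; simp [dfsA, buildB, walkB, walkForestB, forestLen]
  | succ f ih =>
    intro v used r3 r5
    rw [dfsA]
    rw [loopA_eq graph f ih]
    rw [buildB]
    simp only [walkB]
    have hfold : (walkForestB (buildLoopB graph f ((PySem.Dict.mk graph).getD v []) (PySem.Set.add used v)).1).foldl (fun a x => max a (1 + x.1)) 0 =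
        (match walkForestB (buildLoopB graph f ((PySem.Dict.mk graph).getD v []) (PySem.Set.add used v)).1 with
          | [] => (0 : Int)
          | r :: rest => 1 + rest.foldl (fun a x => max a x.1) r.1) := by
      cases hrs : walkForestB (buildLoopB graph f ((PySem.Dict.mk graph).getD v []) (PySem.Set.add used v)).1 with
      | nil => rfl
      | cons r rest =>
        have h1 : 0 ≤ r.1 := walkForestB_h_nonneg _ r (by rw [hrs]; exact List.mem_cons_self)
        simp only [List.foldl_cons]
        rw [show max 0 (1 + r.1) = 1 + r.1 by omega]
        exact foldl_max_shift rest r.1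
    rw [hfold]
    simp only [List.nil_append, length_forestRoots]
    simp only [Prod.mk.injEq]
    refine ⟨trivial, trivial, ?_, ?_⟩ <;> (split_ifs <;> simp [List.append_assoc])

-- ===== VERDICT (by name: the statement is the Claim_ definition above) =====
theorem get_relationships_spec : Claim_equal_get_relationships := by
  intro graph n _ _
  unfold Spec_get_relationships
  simp only [get_relationships, get_relationships_alt]
  rw [dfsA_eq_walk_buildB]
  simp
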